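-- pv_equiv track=rewrite | github.com/Pavucinap/new_project | word_chain/chain.py | word_chain
-- ===== SOURCE A (Python) =====
-- def word_chain(input_list, word=None):
--     chains = []
--     for w in input_list:
--         temp = input_list.copy()
--         if not word:
--             get_chains(chains, temp, w)
--         else:
--             if w.startswith(word[-1]):
--                 get_chains(chains, temp, w)
--     if len(chains) > 0:
--         return max(chains, key=len)
--     return []
--
-- def get_chains(chains, word_list, word):
--     word_list.remove(word)
--     chain = word_chain(word_list, word)
--     list = [word]
--     if len(chain) > 0:
--         list.extend(chain)
--     chains.append(list)
-- ===== SOURCE B (Python) =====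
-- def word_chain(input_list, word=None):
--     # Memoized recursion: cache on (remaining words, required first letter).
--     # Removing a set of first occurrences yields the same remaining sequence in any
--     # order, so converging search branches share one cached subproblem.
--     memo = {}
--
--     def best_chain(words, key):
--         mk = (tuple(words), key)
--         if mk in memo:
--             return memo[mk]
--         best = []
--         for w in words:
--             if key is None or w.startswith(key):
--                 rest = words.copy()
--                 rest.remove(w)
--                 cand = [w] + best_chain(rest, w[-1] if w else None)
--                 if len(cand) > len(best):
--                     best = cand
--         memo[mk] = best
--         return best
--
--     return best_chain(list(input_list), None if not word else word[-1])
-- ===== Notes on version B (the rewrite author's own statement) =====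
-- stated objective: alternative
-- what changed: Replaced the mutually-recursive exhaustive search (collect every chain into a shared list, then max(chains, key=len)) by a memoized recursion over states (remaining words, required first letter): since removing first occurrences in any order leaves the same remaining sequence, converging branches of the search share one cached subproblem instead of being re-explored; it trades the exhaustive chain list for a memo table.
import Mathlib
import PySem

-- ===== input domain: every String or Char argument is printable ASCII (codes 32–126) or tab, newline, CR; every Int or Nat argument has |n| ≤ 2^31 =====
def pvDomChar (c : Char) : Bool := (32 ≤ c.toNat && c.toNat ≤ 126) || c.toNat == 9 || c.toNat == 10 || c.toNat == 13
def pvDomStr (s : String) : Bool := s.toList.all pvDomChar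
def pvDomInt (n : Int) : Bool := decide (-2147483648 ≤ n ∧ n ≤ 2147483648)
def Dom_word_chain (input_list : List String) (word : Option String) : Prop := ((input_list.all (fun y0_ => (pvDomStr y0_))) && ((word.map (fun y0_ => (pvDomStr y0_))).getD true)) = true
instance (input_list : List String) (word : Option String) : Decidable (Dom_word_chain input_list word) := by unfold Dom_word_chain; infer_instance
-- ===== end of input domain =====

-- B replaces A's exhaustive mutually-recursive search (collect every chain, then max by
-- length) with a memoized recursion over states (remaining words, required first letter),
-- so converging branches share one cached subproblem: a different algorithm, same result.


-- ===== PORT A =====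
-- A's admission test: `if not word: … elif w.startswith(word[-1]): …`
-- (`not word` is true for None and for the empty string; word[-1] via pyGet?, whose `none`
-- branch is unreachable since the string is nonempty there)
def pvGuard (word : Option String) (w : String) : Bool :=
  match word with
  | none => true
  | some s =>
      if s = "" then true
      else
        match PySem.Str.pyGet? s (-1) with
        | some c => PySem.Str.startswith w (String.ofList [c])
        | none => false

-- fuel = input_list.length at the top call; each recursive call removes one element,
-- so fuel only guards totality and is never exhausted on a nonempty loop.
def word_chain_fuel : Nat → List String → Option String → List String
  | 0, _, _ => []
  | Nat.succ fuel, input_list, word =>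
    let chains := input_list.foldl
      (fun chains w =>
        if pvGuard word w then
          -- get_chains chains temp w : temp.remove(w); chain = word_chain(temp, w); [w] (+ chain)
          let word_list := (PySem.List.remove? input_list w).getD input_list  -- w ∈ input_list: remove? is some
          let chain := word_chain_fuel fuel word_list (some w)
          let lst := if chain.length > 0 then [w] ++ chain else [w]
          chains ++ [lst]
        else chains) []
    if chains.length > 0 then (PySem.List.max? chains (fun c => c.length)).getD [] else []

def word_chain (input_list : List String) (word : Option String) : List String :=
  word_chain_fuel input_list.length input_list word

-- ===== PORT B =====
-- Source B's memo key second component: `None if not word else word[-1]` (a 1-char string)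
def pvLastKey : Option String → Option String
  | none => none
  | some s =>
      if s = "" then none
      else
        match PySem.Str.pyGet? s (-1) with
        | some c => some (String.ofList [c])
        | none => none

-- Source B's admission test inside best_chain: `key is None or w.startswith(key)`
def pvGuardK (key : Option String) (w : String) : Bool :=
  match key with
  | none => true
  | some p => PySem.Str.startswith w p

-- best_chain with the memo dict threaded through; fuel only guards totality
-- (fuel = words.length at the top call, each recursion removes one word).
def pvBestChain : Nat → List String → Option String →
    PySem.Dict (List String × Option String) (List String) →
    (List String × PySem.Dict (List String × Option String) (List String))
  | 0, _, _, memo => ([], memo)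
  | Nat.succ fuel, words, key, memo =>
    match memo.get? (words, key) with
    | some v => (v, memo)
    | none =>
      let r := words.foldl
        (fun (acc : List String × PySem.Dict (List String × Option String) (List String)) w =>
          if pvGuardK key w then
            let rest := (PySem.List.remove? words w).getD words  -- w ∈ words: remove? is some
            let sub := pvBestChain fuel rest (pvLastKey (some w)) acc.2
            let cand := w :: sub.1
            (if cand.length > acc.1.length then cand else acc.1, sub.2)
          else acc) ([], memo)
      (r.1, r.2.insert (words, key) r.1)

def word_chain_alt (input_list : List String) (word : Option String) : List String :=
  (pvBestChain input_list.length input_list (pvLastKey word) PySem.Dict.empty).1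

-- ===== PRECONDITION & SPEC =====
def Spec_word_chain (input_list : List String) (word : Option String) (out : List String) : Prop := out = word_chain_alt input_list word
instance (input_list : List String) (word : Option String) (out : List String) : Decidable (Spec_word_chain input_list word out) := by unfold Spec_word_chain; infer_instance

-- ===== CLAIM (what is proved, stated in full; the proofs are below) =====
def Claim_equal_word_chain : Prop := ∀ (input_list : List String) (word : Option String), Dom_word_chain input_list word → Spec_word_chain input_list word (word_chain input_list word)

-- ===== LEMMAS AND PROOFS =====

-- Pure (memo-free) running-best recursion keyed by the required first letter:
-- the common reference both ports are reduced to.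
def pvPure : Nat → List String → Option String → List String
  | 0, _, _ => []
  | Nat.succ fuel, words, key =>
    words.foldl
      (fun best w =>
        if pvGuardK key w then
          let rest := (PySem.List.remove? words w).getD words
          let cand := w :: pvPure fuel rest (pvLastKey (some w))
          if cand.length > best.length then cand else best
        else best) []

lemma guard_eq_guardK (word : Option String) (w : String) :
    pvGuard word w = pvGuardK (pvLastKey word) w := by
  cases word with
  | none => rfl
  | some s =>
    by_cases hs : s = ""
    · simp [pvGuard, pvGuardK, pvLastKey, hs]
    · have hne : s.toList ≠ [] := fun h => hs (String.toList_eq_nil_iff.mp h)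
      obtain ⟨c, hc⟩ : ∃ c, PySem.Str.pyGet? s (-1) = some c := by
        cases hl : s.toList with
        | nil => exact absurd hl hne
        | cons a t => simp [PySem.List.pyGet?, PySem.List.pyIdx?, hl]
      simp only [pvGuard, pvGuardK, pvLastKey, if_neg hs, hc]

-- Step 1: A's collect-then-max equals the pure running-best recursion.
-- Running strict-max fold tracks `max? … length` of the accumulated chain list.
lemma fold_max_invariant (cand : String → List String) (hc : ∀ w, 0 < (cand w).length)
    (p : String → Bool) :
    ∀ (L : List String) (chains : List (List String)) (best : List String),
      ((chains = [] ∧ best = []) ∨ PySem.List.max? chains (fun c => c.length) = some best) →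
      ((L.foldl (fun ch w => if p w then ch ++ [cand w] else ch) chains = [] ∧
        L.foldl (fun b w => if p w then (if (cand w).length > b.length then cand w else b) else b) best = []) ∨
       PySem.List.max? (L.foldl (fun ch w => if p w then ch ++ [cand w] else ch) chains) (fun c => c.length) =
         some (L.foldl (fun b w => if p w then (if (cand w).length > b.length then cand w else b) else b) best)) := by
  intro L
  induction L with
  | nil => intro chains best h; simpa using h
  | cons w L ih =>
    intro chains best h
    by_cases hp : p w
    · simp only [List.foldl_cons, hp, if_pos]
      apply ih
      rcases h with ⟨hch, hb⟩ | hmax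
      · subst hch; subst hb
        right
        have : 0 < (cand w).length := hc w
        simp [PySem.List.max?, this]
      · right
        simp only [PySem.List.max?, List.foldl_append] at hmax ⊢
        rw [hmax]
        by_cases hlt : best.length < (cand w).length
        · simp [hlt, gt_iff_lt]
        · simp [hlt, gt_iff_lt]
    · simp only [List.foldl_cons, hp, if_neg, Bool.false_eq_true, not_false_iff]
      exact ih chains best h

lemma word_chain_fuel_eq_pure : ∀ (fuel : Nat) (input_list : List String) (word : Option String),
    word_chain_fuel fuel input_list word = pvPure fuel input_list (pvLastKey word) := by
  intro fuel
  induction fuel with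
  | zero => intro l w; rfl
  | succ fuel ih =>
    intro input_list word
    simp only [word_chain_fuel, pvPure]
    set cand := fun w : String =>
      w :: pvPure fuel ((PySem.List.remove? input_list w).getD input_list) (pvLastKey (some w)) with hcand
    have hc : ∀ w, 0 < (cand w).length := by intro w; simp [hcand]
    have hbodyA : (fun (chains : List (List String)) (w : String) =>
        if pvGuard word w then
          let word_list := (PySem.List.remove? input_list w).getD input_list
          let chain := word_chain_fuel fuel word_list (some w)
          let lst := if chain.length > 0 then [w] ++ chain else [w]
          chains ++ [lst]
        else chains) =
        (fun ch w => if pvGuardK (pvLastKey word) w then ch ++ [cand w] else ch) := by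
      funext ch w
      rw [← guard_eq_guardK]
      by_cases hp : pvGuard word w
      · simp only [hp, if_pos, hcand, ih]
        cases h : pvPure fuel ((PySem.List.remove? input_list w).getD input_list) (pvLastKey (some w)) with
        | nil => simp
        | cons a t => simp
      · simp [hp]
    have hbodyB : (fun (best : List String) (w : String) =>
        if pvGuardK (pvLastKey word) w then
          let rest := (PySem.List.remove? input_list w).getD input_list
          let c := w :: pvPure fuel rest (pvLastKey (some w))
          if c.length > best.length then c else best
        else best) =
        (fun b w => if pvGuardK (pvLastKey word) w then (if (cand w).length > b.length then cand w else b) else b) := by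
      funext b w; simp [hcand]
    have hinv := fold_max_invariant cand hc (pvGuardK (pvLastKey word)) input_list [] []
      (Or.inl ⟨rfl, rfl⟩)
    rw [hbodyA, hbodyB]
    rcases hinv with ⟨hch, hb⟩ | hmax
    · rw [hch, hb]; simp
    · have hne : (input_list.foldl (fun ch w => if pvGuardK (pvLastKey word) w then ch ++ [cand w] else ch)
          ([] : List (List String))) ≠ [] := by
        intro h0
        rw [h0] at hmax
        simp [PySem.List.max?] at hmax
      rw [hmax]
      simp [List.length_pos_iff.mpr hne]

-- fuel irrelevance for the pure recursion (fuel ≥ words.length never runs out)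
lemma pvPure_fuel_irrel : ∀ (fuel : Nat) (words : List String) (key : Option String),
    words.length ≤ fuel →
    pvPure fuel words key = pvPure words.length words key := by
  intro fuel
  induction fuel with
  | zero =>
    intro words key h
    have : words = [] := List.length_eq_zero_iff.mp (Nat.le_zero.mp h)
    subst this; rfl
  | succ fuel ih =>
    intro words key h
    cases words with
    | nil => rfl
    | cons x t =>
      simp only [List.length_cons] at h ⊢
      simp only [pvPure]
      apply PySem.List.foldl_congr_mem
      intro best w hw
      have hw' : w ∈ x :: t := hw
      have hrest : (PySem.List.remove? (x :: t) w).getD (x :: t) = (x :: t).erase w := by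
        rw [PySem.List.remove?_eq_some_erase (x :: t) w hw']; rfl
      have hrlen : ((x :: t).erase w).length = t.length := by
        have := List.length_erase_of_mem hw'
        simp at this
        simpa using this
      by_cases hp : pvGuardK key w
      · simp only [hp, if_pos, hrest]
        rw [ih ((x :: t).erase w) (pvLastKey (some w)) (by omega), hrlen]
      · simp [hp]

-- Step 2: memoization correctness. A memo is good when every cached value is the
-- pure value of its state (with fuel = the state's own length).
def GoodMemo (memo : PySem.Dict (List String × Option String) (List String)) : Prop :=
  ∀ k v, memo.get? k = some v → v = pvPure k.1.length k.1 k.2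

lemma goodMemo_empty : GoodMemo PySem.Dict.empty := by
  intro k v h
  simp [PySem.Dict.empty, PySem.Dict.get?] at h

lemma bestChain_correct : ∀ (fuel : Nat) (words : List String) (key : Option String)
    (memo : PySem.Dict (List String × Option String) (List String)),
    words.length ≤ fuel → GoodMemo memo →
    (pvBestChain fuel words key memo).1 = pvPure words.length words key ∧
    GoodMemo (pvBestChain fuel words key memo).2 := by
  intro fuel
  induction fuel with
  | zero =>
    intro words key memo hlen hg
    have : words = [] := List.length_eq_zero_iff.mp (Nat.le_zero.mp hlen)
    subst this
    exact ⟨rfl, hg⟩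
  | succ fuel ih =>
    intro words key memo hlen hg
    simp only [pvBestChain]
    cases hmem : memo.get? (words, key) with
    | some v =>
      exact ⟨hg _ _ hmem, hg⟩
    | none =>
      -- the memoized fold tracks the pure fold (both at fuel) and keeps the memo good
      have hfold : ∀ (L : List String), (∀ w ∈ L, w ∈ words) →
          ∀ (best : List String) (m : PySem.Dict (List String × Option String) (List String)),
          GoodMemo m →
          (L.foldl (fun (acc : List String × PySem.Dict (List String × Option String) (List String)) w =>
              if pvGuardK key w then
                let rest := (PySem.List.remove? words w).getD words
                let sub := pvBestChain fuel rest (pvLastKey (some w)) acc.2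
                let cand := w :: sub.1
                (if cand.length > acc.1.length then cand else acc.1, sub.2)
              else acc) (best, m)).1 =
            L.foldl (fun best w =>
              if pvGuardK key w then
                let rest := (PySem.List.remove? words w).getD words
                let cand := w :: pvPure fuel rest (pvLastKey (some w))
                if cand.length > best.length then cand else best
              else best) best ∧
          GoodMemo (L.foldl (fun (acc : List String × PySem.Dict (List String × Option String) (List String)) w =>
              if pvGuardK key w then
                let rest := (PySem.List.remove? words w).getD words
                let sub := pvBestChain fuel rest (pvLastKey (some w)) acc.2
                let cand := w :: sub.1
                (if cand.length > acc.1.length then cand else acc.1, sub.2)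
              else acc) (best, m)).2 := by
        intro L
        induction L with
        | nil => intro _ best m hm; exact ⟨rfl, hm⟩
        | cons w L ihL =>
          intro hsub best m hm
          have hw : w ∈ words := hsub w (List.mem_cons_self)
          have hrest : (PySem.List.remove? words w).getD words = words.erase w := by
            rw [PySem.List.remove?_eq_some_erase words w hw]; rfl
          have hrlen : (words.erase w).length ≤ fuel := by
            have := List.length_erase_of_mem hw
            omega
          have hrec := ih (words.erase w) (pvLastKey (some w)) m hrlen hm
          have hval : (pvBestChain fuel (words.erase w) (pvLastKey (some w)) m).1 =
              pvPure fuel (words.erase w) (pvLastKey (some w)) := by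
            rw [hrec.1, pvPure_fuel_irrel fuel (words.erase w) (pvLastKey (some w)) hrlen]
          simp only [List.foldl_cons]
          by_cases hp : pvGuardK key w
          · simp only [hp, if_pos, hrest, hval]
            exact ihL (fun x hx => hsub x (List.mem_cons_of_mem _ hx)) _ _ hrec.2
          · simp only [hp, if_neg, Bool.false_eq_true, not_false_iff]
            exact ihL (fun x hx => hsub x (List.mem_cons_of_mem _ hx)) best m hm
      have hmain := hfold words (fun _ hx => hx) [] memo hg
      have hpure : pvPure words.length words key =
          words.foldl (fun best w =>
            if pvGuardK key w then
              let rest := (PySem.List.remove? words w).getD words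
              let cand := w :: pvPure fuel rest (pvLastKey (some w))
              if cand.length > best.length then cand else best
            else best) [] := by
        rw [← pvPure_fuel_irrel (Nat.succ fuel) words key hlen]
        rfl
      refine ⟨by rw [hmain.1, ← hpure], ?_⟩
      intro k v h
      rw [PySem.Dict.get?_insert] at h
      split_ifs at h with hk
      · subst hk
        have := hmain.1
        injection h with h'
        rw [← h', this, ← hpure]
      · exact hmain.2 _ _ h

-- ===== VERDICT (by name: the statement is the Claim_ definition above) =====
theorem word_chain_spec : Claim_equal_word_chain := by
  intro input_list word _
  show word_chain input_list word = word_chain_alt input_list word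
  unfold word_chain word_chain_alt
  rw [word_chain_fuel_eq_pure]
  exact ((bestChain_correct input_list.length input_list (pvLastKey word)
    PySem.Dict.empty le_rfl goodMemo_empty).1).symm
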